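-- pv_equiv track=rewrite | github.com/d1fmarketing/book-automation | agents/image_prompt_agent.py | get_sora_style_tags
-- ===== SOURCE A (Python) =====
-- def get_sora_style_tags(desc: str) -> str:
--     """Determine appropriate Sora style tags based on description"""
--     desc_lower = desc.lower()
--
--     # Default style tags
--     tags = []
--
--     # Determine primary style
--     if any(word in desc_lower for word in ['logo', 'icon', 'geometric', 'minimalist']):
--         tags.append('vector')
--     elif any(word in desc_lower for word in ['neon', 'cyberpunk', 'glow']):
--         tags.append('neon')
--     elif any(word in desc_lower for word in ['isometric', '3d', 'dimensional']):
--         tags.append('isometric')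
--     elif any(word in desc_lower for word in ['photo', 'realistic', 'mockup']):
--         tags.append('photo')
--     else:
--         tags.append('illustration')
--
--     # Add sharpness
--     tags.append('ultra-sharp')
--
--     return ', '.join(tags)
-- ===== SOURCE B (Python) =====
-- # Flat keyword->priority map; scan every keyword, take the minimum priority hit.
-- KEYWORD_RANK = {
--     'logo': 0, 'icon': 0, 'geometric': 0, 'minimalist': 0,
--     'neon': 1, 'cyberpunk': 1, 'glow': 1,
--     'isometric': 2, '3d': 2, 'dimensional': 2,
--     'photo': 3, 'realistic': 3, 'mockup': 3,
-- }
-- PRIMARY_TAGS = ['vector', 'neon', 'isometric', 'photo']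
--
--
-- def get_sora_style_tags(desc: str) -> str:
--     desc_lower = desc.lower()
--     ranks = [rank for kw, rank in KEYWORD_RANK.items() if kw in desc_lower]
--     primary = PRIMARY_TAGS[min(ranks)] if ranks else 'illustration'
--     return ', '.join([primary, 'ultra-sharp'])
-- ===== Notes on version B (the rewrite author's own statement) =====
-- stated objective: alternative
-- what changed: Replaces A's short-circuiting if/elif chain of per-group any() tests with a flat keyword-to-priority dict scanned exhaustively, collecting priorities of all matching keywords and selecting the tag of the minimum priority (default 'illustration'); correct because the minimum matching priority is exactly the first group A's chain fires on.
import Mathlib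
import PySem

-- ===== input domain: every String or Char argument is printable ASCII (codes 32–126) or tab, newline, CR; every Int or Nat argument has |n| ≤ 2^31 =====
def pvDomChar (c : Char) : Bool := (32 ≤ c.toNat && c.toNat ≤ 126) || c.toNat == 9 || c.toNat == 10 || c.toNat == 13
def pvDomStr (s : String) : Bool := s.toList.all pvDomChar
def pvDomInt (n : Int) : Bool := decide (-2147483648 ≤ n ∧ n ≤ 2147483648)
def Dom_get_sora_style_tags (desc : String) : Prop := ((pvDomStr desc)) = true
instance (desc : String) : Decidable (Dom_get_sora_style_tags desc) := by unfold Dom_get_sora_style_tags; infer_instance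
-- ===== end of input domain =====

-- B replaces A's short-circuit if/elif chain with a flat keyword→priority map scanned
-- exhaustively, taking the minimum matching priority (alternative decomposition, same cost).

-- ===== PORT A =====
def get_sora_style_tags (desc : String) : String :=
  let desc_lower := PySem.Str.lower desc
  let tags : List String := []
  let tags :=
    if (["logo", "icon", "geometric", "minimalist"]).any (fun w => PySem.Str.isIn w desc_lower) then
      tags ++ ["vector"]
    else if (["neon", "cyberpunk", "glow"]).any (fun w => PySem.Str.isIn w desc_lower) then
      tags ++ ["neon"]
    else if (["isometric", "3d", "dimensional"]).any (fun w => PySem.Str.isIn w desc_lower) then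
      tags ++ ["isometric"]
    else if (["photo", "realistic", "mockup"]).any (fun w => PySem.Str.isIn w desc_lower) then
      tags ++ ["photo"]
    else
      tags ++ ["illustration"]
  let tags := tags ++ ["ultra-sharp"]
  PySem.Str.join ", " tags

-- ===== PORT B =====
def keywordRank : List (String × Nat) :=
  [("logo", 0), ("icon", 0), ("geometric", 0), ("minimalist", 0),
   ("neon", 1), ("cyberpunk", 1), ("glow", 1),
   ("isometric", 2), ("3d", 2), ("dimensional", 2),
   ("photo", 3), ("realistic", 3), ("mockup", 3)]

def primaryTags : List String := ["vector", "neon", "isometric", "photo"]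

def get_sora_style_tags_alt (desc : String) : String :=
  let desc_lower := PySem.Str.lower desc
  let ranks := (keywordRank.filter (fun p => PySem.Str.isIn p.1 desc_lower)).map (·.2)
  -- 'PRIMARY_TAGS[min(ranks)] if ranks else ...': min via PySem.List.min?, index via getD
  -- (the rank is always 0..3, so the Python index never raises)
  let primary :=
    match PySem.List.min? ranks (fun r => r) with
    | some r => primaryTags.getD r "illustration"
    | none => "illustration"
  PySem.Str.join ", " [primary, "ultra-sharp"]

-- ===== PRECONDITION & SPEC =====
def Spec_get_sora_style_tags (desc : String) (out : String) : Prop := out = get_sora_style_tags_alt desc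
instance (desc : String) (out : String) : Decidable (Spec_get_sora_style_tags desc out) := by unfold Spec_get_sora_style_tags; infer_instance

-- ===== CLAIM (what is proved, stated in full; the proofs are below) =====
def Claim_equal_get_sora_style_tags : Prop := ∀ (desc : String), Dom_get_sora_style_tags desc → Spec_get_sora_style_tags desc (get_sora_style_tags desc)

-- ===== LEMMAS AND PROOFS =====

-- Filtering pairs by a test on the key, then projecting the rank, equals tagging each
-- pair with its test result first and filtering on that tag (plain induction).
theorem pv_bridge (f : String → Bool) (l : List (String × Nat)) :
    (l.filter (fun p => f p.1)).map (fun x => x.2)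
    = ((l.map (fun p => (f p.1, p.2))).filter (fun p => p.1)).map (fun x => x.2) := by
  induction l with
  | nil => rfl
  | cons x l ih => cases h : f x.1 <;> simp [h, ih]

-- With the 13 match results as free booleans, the minimum surviving rank is the first
-- group with a hit; 'decide' checks all 2^13 cases (Nat/Option only — no strings).
theorem pv_min : ∀ (b1 b2 b3 b4 b5 b6 b7 b8 b9 b10 b11 b12 b13 : Bool),
    PySem.List.min? ((([(b1, 0), (b2, 0), (b3, 0), (b4, 0), (b5, 1), (b6, 1), (b7, 1), (b8, 2), (b9, 2), (b10, 2), (b11, 3), (b12, 3), (b13, 3)] : List (Bool × Nat)).filter (fun p => p.1)).map (fun x => x.2)) (fun r => r)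
    = (if b1 || (b2 || (b3 || b4)) then some 0
       else if b5 || (b6 || b7) then some 1
       else if b8 || (b9 || b10) then some 2
       else if b11 || (b12 || b13) then some 3
       else none) := by
  decide

-- ===== VERDICT (by name: the statement is the Claim_ definition above) =====
theorem get_sora_style_tags_spec : Claim_equal_get_sora_style_tags := by
  intro desc _
  unfold Spec_get_sora_style_tags
  simp only [get_sora_style_tags, get_sora_style_tags_alt, keywordRank,
    List.any_cons, List.any_nil, Bool.or_false, List.nil_append]
  rw [pv_bridge (fun w => PySem.Str.isIn w (PySem.Str.lower desc))]
  simp only [List.map_cons, List.map_nil]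
  rw [pv_min (PySem.Str.isIn "logo" (PySem.Str.lower desc)) (PySem.Str.isIn "icon" (PySem.Str.lower desc)) (PySem.Str.isIn "geometric" (PySem.Str.lower desc)) (PySem.Str.isIn "minimalist" (PySem.Str.lower desc)) (PySem.Str.isIn "neon" (PySem.Str.lower desc)) (PySem.Str.isIn "cyberpunk" (PySem.Str.lower desc)) (PySem.Str.isIn "glow" (PySem.Str.lower desc)) (PySem.Str.isIn "isometric" (PySem.Str.lower desc)) (PySem.Str.isIn "3d" (PySem.Str.lower desc)) (PySem.Str.isIn "dimensional" (PySem.Str.lower desc)) (PySem.Str.isIn "photo" (PySem.Str.lower desc)) (PySem.Str.isIn "realistic" (PySem.Str.lower desc)) (PySem.Str.isIn "mockup" (PySem.Str.lower desc))]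
  generalize (PySem.Str.isIn "logo" (PySem.Str.lower desc) || (PySem.Str.isIn "icon" (PySem.Str.lower desc) || (PySem.Str.isIn "geometric" (PySem.Str.lower desc) || PySem.Str.isIn "minimalist" (PySem.Str.lower desc))) : Bool) = c0
  generalize (PySem.Str.isIn "neon" (PySem.Str.lower desc) || (PySem.Str.isIn "cyberpunk" (PySem.Str.lower desc) || PySem.Str.isIn "glow" (PySem.Str.lower desc)) : Bool) = c1
  generalize (PySem.Str.isIn "isometric" (PySem.Str.lower desc) || (PySem.Str.isIn "3d" (PySem.Str.lower desc) || PySem.Str.isIn "dimensional" (PySem.Str.lower desc)) : Bool) = c2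
  generalize (PySem.Str.isIn "photo" (PySem.Str.lower desc) || (PySem.Str.isIn "realistic" (PySem.Str.lower desc) || PySem.Str.isIn "mockup" (PySem.Str.lower desc)) : Bool) = c3
  revert c0 c1 c2 c3
  decide
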